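-- pv_equiv track=rewrite | github.com/rhgkstjf/python | programmers/level1/음양 더하기/code.py | solution
-- ===== SOURCE A (Python) =====
-- def solution(absolutes, signs):
--     answer = 0
--
--     for index,value in enumerate(absolutes):
--         if signs[index] == True:
--             answer += value
--         else:
--             answer -= value
--
--     return answer
-- ===== SOURCE B (Python) =====
-- def solution(absolutes, signs):
--     # identity: signed sum = total - 2 * (sum of entries whose sign is not True)
--     total = 0
--     for v in absolutes:
--         total += v
--     neg = 0
--     for i in range(len(absolutes)):
--         if signs[i] != True:
--             neg += absolutes[i]
--     return total - 2 * neg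
-- ===== Notes on version B (the rewrite author's own statement) =====
-- stated objective: alternative
-- what changed: Replaces the single add-or-subtract pass with two differently-shaped passes using the identity signed_sum = sum(absolutes) - 2*sum(negatively-signed entries).
import Mathlib
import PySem

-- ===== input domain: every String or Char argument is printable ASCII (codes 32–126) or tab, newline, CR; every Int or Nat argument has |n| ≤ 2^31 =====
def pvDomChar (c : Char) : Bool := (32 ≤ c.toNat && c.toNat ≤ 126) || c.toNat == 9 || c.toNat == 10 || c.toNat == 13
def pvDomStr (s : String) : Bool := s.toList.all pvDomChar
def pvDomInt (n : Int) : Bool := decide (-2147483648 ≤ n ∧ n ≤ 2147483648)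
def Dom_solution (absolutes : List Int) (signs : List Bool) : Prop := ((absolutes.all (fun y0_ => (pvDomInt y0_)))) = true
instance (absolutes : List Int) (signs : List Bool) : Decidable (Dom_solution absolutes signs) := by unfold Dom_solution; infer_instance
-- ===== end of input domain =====

-- B computes the same signed sum by two differently-shaped passes (total minus twice the negatives)
-- instead of A's single add-or-subtract pass; same O(n) cost, alternative decomposition.

-- ===== PORT A =====
-- one fold over enumerate(absolutes), adding or subtracting depending on signs[index]
def solution (absolutes : List Int) (signs : List Bool) : Int :=
  (PySem.List.enumerate absolutes 0).foldl
    (fun answer p =>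
      if PySem.List.pyGetD signs p.1 false == true then answer + p.2 else answer - p.2) 0

-- ===== PORT B =====
-- pass 1: total = sum(absolutes); pass 2: neg = sum of entries whose sign is not True; result total - 2*neg
def solution_alt (absolutes : List Int) (signs : List Bool) : Int :=
  let total := absolutes.foldl (fun t v => t + v) 0
  let neg := (PySem.List.pyRange 0 (absolutes.length : Int) 1).foldl
    (fun n i =>
      if PySem.List.pyGetD signs i false != true then n + PySem.List.pyGetD absolutes i 0 else n) 0
  total - 2 * neg

-- ===== PRECONDITION & SPEC =====
-- Pre_ excludes exactly the inputs where A raises IndexError: signs shorter than absolutes.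
def Pre_solution (absolutes : List Int) (signs : List Bool) : Prop :=
  absolutes.length ≤ signs.length
instance (absolutes : List Int) (signs : List Bool) : Decidable (Pre_solution absolutes signs) := by
  unfold Pre_solution; infer_instance
def pvWitness_solution : List Int × List Bool := ([4, 7, 12], [true, false, true])

def Spec_solution (absolutes : List Int) (signs : List Bool) (out : Int) : Prop := out = solution_alt absolutes signs
instance (absolutes : List Int) (signs : List Bool) (out : Int) : Decidable (Spec_solution absolutes signs out) := by unfold Spec_solution; infer_instance

-- ===== CLAIM (what is proved, stated in full; the proofs are below) =====
def Claim_equal_solution : Prop := ∀ (absolutes : List Int) (signs : List Bool), Dom_solution absolutes signs → Pre_solution absolutes signs → Spec_solution absolutes signs (solution absolutes signs)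

-- ===== LEMMAS AND PROOFS =====

-- A's fold: pull the accumulator out front
theorem accA (xs : List Int) (ss : List Bool) (k acc : Int) :
    (PySem.List.enumerate xs k).foldl
      (fun answer p => if PySem.List.pyGetD ss p.1 false == true then answer + p.2 else answer - p.2) acc
    = acc + (PySem.List.enumerate xs k).foldl
      (fun answer p => if PySem.List.pyGetD ss p.1 false == true then answer + p.2 else answer - p.2) 0 := by
  induction xs generalizing k acc with
  | nil => simp [PySem.List.enumerate_nil]
  | cons x xs ih =>
    simp only [PySem.List.enumerate_cons, List.foldl_cons]
    rw [ih, ih (acc := (if PySem.List.pyGetD ss k false == true then 0 + x else 0 - x))]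
    split <;> ring

-- A's fold: shifting the enumerate start by one matches dropping the head sign
theorem shiftA (xs : List Int) (s : Bool) (ss : List Bool) (k : Nat) (acc : Int) :
    (PySem.List.enumerate xs ((k : Int) + 1)).foldl
      (fun answer p => if PySem.List.pyGetD (s :: ss) p.1 false == true then answer + p.2 else answer - p.2) acc
    = (PySem.List.enumerate xs (k : Int)).foldl
      (fun answer p => if PySem.List.pyGetD ss p.1 false == true then answer + p.2 else answer - p.2) acc := by
  induction xs generalizing k acc with
  | nil => simp [PySem.List.enumerate_nil]
  | cons x xs ih =>
    simp only [PySem.List.enumerate_cons, List.foldl_cons]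
    have h1 : ((k : Int) + 1) = ((k + 1 : Nat) : Int) := by push_cast; ring
    have h2 : PySem.List.pyGetD (s :: ss) ((k : Int) + 1) false = PySem.List.pyGetD ss (k : Int) false := by
      rw [h1, PySem.List.pyGetD_natCast, PySem.List.pyGetD_natCast, List.getD_cons_succ]
    rw [h2, h1, ih]

-- B's negative-sum fold: pull the accumulator out front
theorem accB (ss : List Bool) (xs : List Int) (r : List Int) (acc : Int) :
    r.foldl (fun n i => if PySem.List.pyGetD ss i false != true then n + PySem.List.pyGetD xs i 0 else n) acc
    = acc + r.foldl (fun n i => if PySem.List.pyGetD ss i false != true then n + PySem.List.pyGetD xs i 0 else n) 0 := by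
  induction r generalizing acc with
  | nil => simp
  | cons i r ih =>
    simp only [List.foldl_cons]
    rw [ih, ih (acc := (if PySem.List.pyGetD ss i false != true then 0 + PySem.List.pyGetD xs i 0 else 0))]
    split <;> ring

-- B's negative-sum fold over range(1, n+1) on the extended lists equals range(0, n) on the tails
theorem shiftB (m : Nat) (x : Int) (xs : List Int) (s : Bool) (ss : List Bool) (acc : Int) :
    (PySem.List.pyRange 1 ((m : Int) + 1) 1).foldl
      (fun n i => if PySem.List.pyGetD (s :: ss) i false != true then n + PySem.List.pyGetD (x :: xs) i 0 else n) acc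
    = (PySem.List.pyRange 0 (m : Int) 1).foldl
      (fun n i => if PySem.List.pyGetD ss i false != true then n + PySem.List.pyGetD xs i 0 else n) acc := by
  rw [PySem.List.pyRange_one 1, PySem.List.pyRange_one 0]
  have hm1 : (((m : Int) + 1) - 1).toNat = m := by omega
  have hm0 : ((m : Int) - 0).toNat = m := by omega
  rw [hm1, hm0, List.foldl_map, List.foldl_map]
  apply PySem.List.foldl_congr_mem
  intro n i _
  have h1 : (1 : Int) + (i : Int) = ((i + 1 : Nat) : Int) := by omega
  have h0 : (0 : Int) + (i : Int) = ((i : Nat) : Int) := by omega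
  rw [h1, h0, PySem.List.pyGetD_natCast, PySem.List.pyGetD_natCast,
      PySem.List.pyGetD_natCast, PySem.List.pyGetD_natCast,
      List.getD_cons_succ, List.getD_cons_succ]

-- accumulator extraction for the plain sum fold
theorem accSum (xs : List Int) (acc : Int) :
    xs.foldl (fun t v => t + v) acc = acc + xs.foldl (fun t v => t + v) 0 := by
  induction xs generalizing acc with
  | nil => simp
  | cons x xs ih =>
    simp only [List.foldl_cons]
    rw [ih, ih (acc := 0 + x)]; ring

-- main equality on all inputs where signs is at least as long as absolutes
theorem main_eq (xs : List Int) (ss : List Bool) (h : xs.length ≤ ss.length) :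
    solution xs ss = solution_alt xs ss := by
  induction xs generalizing ss with
  | nil =>
    simp [solution, solution_alt, PySem.List.enumerate_nil]
  | cons x xs ih =>
    cases ss with
    | nil => simp at h
    | cons s ss =>
      have hlen : xs.length ≤ ss.length := by simpa using h
      have hA :
          solution (x :: xs) (s :: ss)
            = (if s = true then x else -x) + solution xs ss := by
        simp only [solution, PySem.List.enumerate_cons, List.foldl_cons]
        have h0 : PySem.List.pyGetD (s :: ss) 0 false = s := by
          simp [PySem.List.pyGetD_zero_cons]
        rw [h0]
        have hsh := shiftA xs s ss 0
        simp only [Nat.cast_zero] at hsh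
        rw [hsh, accA]
        cases s <;> simp
      have hB :
          solution_alt (x :: xs) (s :: ss)
            = (if s = true then x else -x) + solution_alt xs ss := by
        simp only [solution_alt]
        have hcons : PySem.List.pyRange 0 ((x :: xs).length : Int) 1
            = 0 :: PySem.List.pyRange 1 ((x :: xs).length : Int) 1 := by
          apply PySem.List.pyRange_one_cons; simp
        rw [hcons]
        simp only [List.foldl_cons, List.length_cons]
        have h0s : PySem.List.pyGetD (s :: ss) (0 : Int) false = s := by
          simp [PySem.List.pyGetD_zero_cons]
        have h0x : PySem.List.pyGetD (x :: xs) (0 : Int) 0 = x := by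
          simp [PySem.List.pyGetD_zero_cons]
        rw [h0s, h0x]
        have hc : ((xs.length + 1 : Nat) : Int) = (xs.length : Int) + 1 := by push_cast; ring
        rw [hc, shiftB xs.length x xs s ss, accB, accSum]
        cases s <;> simp <;> ring
      rw [hA, hB, ih ss hlen]

-- ===== VERDICT (by name: the statement is the Claim_ definition above) =====
theorem solution_spec : Claim_equal_solution := by
  intro absolutes signs _ hpre
  unfold Spec_solution
  exact main_eq absolutes signs hpre
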